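-- pv_equiv track=rewrite | github.com/Dishaaa25/openenv-data-cleaning | env/environment.py | _pick_mode
-- ===== SOURCE A (Python) =====
-- def _pick_mode(values: list[str]) -> str:
--     counts: dict[str, int] = {}
--     for value in values:
--         counts[value] = counts.get(value, 0) + 1
--     return min(
--         counts.items(),
--         key=lambda item: (-item[1], item[0].lower(), 0 if item[0].islower() else 1, item[0]),
--     )[0]
-- ===== SOURCE B (Python) =====
-- def _pick_mode(values: list[str]) -> str:
--     # Sort-and-group instead of dict + min-scan: order the values by the
--     # secondary tie-break key, then one pass over the runs of equal values
--     # keeps the first (in tie-break order) value with the strictly largest run.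
--     if not values:
--         raise ValueError("_pick_mode: empty values")
--     ordered = sorted(values, key=lambda v: (v.lower(), 0 if v.islower() else 1, v))
--     best = prev = ordered[0]
--     best_count = run_count = 1
--     for v in ordered[1:]:
--         run_count = run_count + 1 if v == prev else 1
--         if run_count > best_count:
--             best, best_count = v, run_count
--         prev = v
--     return best
-- ===== Notes on version B (the rewrite author's own statement) =====
-- stated objective: alternative
-- what changed: Replaced the dict-counting pass plus a min-scan over counts.items() with sorting the values by the secondary tie-break key (lower, islower flag, value) and a single run-length pass over the sorted list that keeps the first value with a strictly longest run.
import Mathlib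
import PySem

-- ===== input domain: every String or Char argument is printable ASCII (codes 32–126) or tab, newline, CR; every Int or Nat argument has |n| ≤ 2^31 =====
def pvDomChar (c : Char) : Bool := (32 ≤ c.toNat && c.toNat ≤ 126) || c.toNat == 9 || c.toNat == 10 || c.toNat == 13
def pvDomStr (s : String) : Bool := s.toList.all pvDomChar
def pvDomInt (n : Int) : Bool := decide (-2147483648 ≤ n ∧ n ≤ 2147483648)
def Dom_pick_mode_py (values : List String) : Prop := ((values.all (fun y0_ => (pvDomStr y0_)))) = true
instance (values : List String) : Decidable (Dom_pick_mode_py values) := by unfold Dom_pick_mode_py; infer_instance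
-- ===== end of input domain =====

-- B replaces A's dict-count + min-scan with sort-by-tie-break-key + one run-length pass (objective: alternative).
-- s.islower() for a whole string; exact on the printable-ASCII domain, where the cased characters
-- are exactly the letters (isalpha)
def pyStrIslower (s : String) : Bool :=
  s.toList.any PySem.Str.isalpha && !(s.toList.any PySem.Str.isupper)

-- the component "0 if v.islower() else 1" of the tie-break tuple
def tieFlag (v : String) : Int := if pyStrIslower v then 0 else 1

-- strict Python '<' between the tie-break tuples (a.lower(), flag a, a) and (b.lower(), flag b, b);
-- the tuple comparison is spelled out component by component (exact: Python tuple '<' is lexicographic,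
-- and Python str '<' is Lean's '<' on String)
def tieLt (a b : String) : Bool :=
  decide (PySem.Str.lower a < PySem.Str.lower b) ||
    (decide (PySem.Str.lower a = PySem.Str.lower b) &&
      (decide (tieFlag a < tieFlag b) ||
        (decide (tieFlag a = tieFlag b) && decide (a < b))))

-- ===== PORT A =====
-- strict Python '<' between the full min-keys (-x[1], x[0].lower(), flag x[0], x[0])
def itemLt (x y : String × Int) : Bool :=
  decide (-x.2 < -y.2) || (decide (-x.2 = -y.2) && tieLt x.1 y.1)

-- one step of Python's min(): keep the accumulator unless the new item's key is strictly smaller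
def minStep (acc : Option (String × Int)) (it : String × Int) : Option (String × Int) :=
  match acc with
  | none => some it
  | some m => if itemLt it m then some it else some m

def pick_mode_py (values : List String) : String :=
  let counts := values.foldl (fun (c : PySem.Dict String Int) v => c.insert v (c.getD v 0 + 1)) PySem.Dict.empty
  -- min(counts.items(), key=...): the first element with the strictly smallest key, exactly
  -- Python's min; the tuple key is compared explicitly via itemLt
  match counts.items.foldl minStep none with
  | some it => it.1
  | none => ""      -- Python: min() raises ValueError here (empty values); excluded by Pre_

-- ===== PORT B =====
-- state (best, prev, best_count, run_count); one step of Source B's loop over ordered[1:]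
def runStep (s : String × String × Int × Int) (v : String) : String × String × Int × Int :=
  let runC := if v = s.2.1 then s.2.2.2 + 1 else 1
  if runC > s.2.2.1 then (v, v, runC, runC) else (s.1, v, s.2.2.1, runC)

def pick_mode_py_alt (values : List String) : String :=
  -- sorted(values, key=...): Python's stable sort = repeated ordered insertion with the strict
  -- tuple-key comparison tieLt (PySem.List.sorted is definitionally this foldl of insertBy)
  match values.foldl (fun acc v => PySem.List.insertBy tieLt v acc) [] with
  | [] => ""      -- Python B raises ValueError here (empty values); excluded by Pre_
  | h :: t => (t.foldl runStep (h, h, 1, 1)).1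

-- ===== PRECONDITION & SPEC =====
-- Pre_ excludes only the empty list, on which both A (min() of an empty dict) and B raise ValueError.
def Pre_pick_mode_py (values : List String) : Prop := values ≠ []
instance (values : List String) : Decidable (Pre_pick_mode_py values) := by unfold Pre_pick_mode_py; infer_instance
def pvWitness_pick_mode_py : List String := (["a", "B", "a"])

def Spec_pick_mode_py (values : List String) (out : String) : Prop := out = pick_mode_py_alt values
instance (values : List String) (out : String) : Decidable (Spec_pick_mode_py values out) := by unfold Spec_pick_mode_py; infer_instance

-- ===== CLAIM (what is proved, stated in full; the proofs are below) =====
def Claim_equal_pick_mode_py : Prop := ∀ (values : List String), Dom_pick_mode_py values → Pre_pick_mode_py values → Spec_pick_mode_py values (pick_mode_py values)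

-- ===== LEMMAS AND PROOFS =====

-- the tie-break key as a lexicographic triple (proof-side view of tieLt)
def keyTie (v : String) : Lex (String × Lex (Int × String)) :=
  toLex (PySem.Str.lower v, toLex (tieFlag v, v))

-- the full min-key (-count, tie-break triple) (proof-side view of itemLt)
def keyItem (it : String × Int) : Lex (Int × Lex (String × Lex (Int × String))) :=
  toLex (-it.2, keyTie it.1)

theorem tieLt_eq (a b : String) : tieLt a b = decide (keyTie a < keyTie b) := by
  have hiff : (keyTie a < keyTie b) ↔
      (PySem.Str.lower a < PySem.Str.lower b ∨
        (PySem.Str.lower a = PySem.Str.lower b ∧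
          (tieFlag a < tieFlag b ∨ (tieFlag a = tieFlag b ∧ a < b)))) := by
    unfold keyTie
    rw [Prod.Lex.lt_iff, Prod.Lex.lt_iff]
    simp
  simp only [hiff]
  unfold tieLt
  simp

theorem itemLt_eq (x y : String × Int) : itemLt x y = decide (keyItem x < keyItem y) := by
  have hiff : (keyItem x < keyItem y) ↔
      (-x.2 < -y.2 ∨ (-x.2 = -y.2 ∧ keyTie x.1 < keyTie y.1)) := by
    unfold keyItem
    rw [Prod.Lex.lt_iff]
    simp
  simp only [hiff]
  unfold itemLt
  rw [tieLt_eq]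
  simp

theorem itemLt_iff (x y : String × Int) : itemLt x y = true ↔ keyItem x < keyItem y := by
  rw [itemLt_eq]
  exact decide_eq_true_iff

-- Python's min() fold from a some-accumulator always yields some value,
-- no larger than the start and either the start or a member
theorem minfold_le : ∀ (l : List (String × Int)) (m0 : String × Int),
    ∃ m, l.foldl minStep (some m0) = some m ∧
      keyItem m ≤ keyItem m0 ∧ (m = m0 ∨ m ∈ l) := by
  intro l
  induction l with
  | nil => intro m0; exact ⟨m0, rfl, le_refl _, Or.inl rfl⟩
  | cons x xs ih =>
    intro m0
    rw [List.foldl_cons]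
    cases hb : itemLt x m0 with
    | true =>
      have hstep : minStep (some m0) x = some x := by simp [minStep, hb]
      rw [hstep]
      obtain ⟨m, hm, hle, hmem⟩ := ih x
      refine ⟨m, hm, le_of_lt (lt_of_le_of_lt hle ((itemLt_iff x m0).1 hb)), ?_⟩
      rcases hmem with rfl | hmem
      · exact Or.inr (by simp)
      · exact Or.inr (by simp [hmem])
    | false =>
      have hstep : minStep (some m0) x = some m0 := by simp [minStep, hb]
      rw [hstep]
      obtain ⟨m, hm, hle, hmem⟩ := ih m0
      refine ⟨m, hm, hle, ?_⟩
      rcases hmem with rfl | hmem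
      · exact Or.inl rfl
      · exact Or.inr (by simp [hmem])

-- the min() fold's result is a lower bound of every element scanned
theorem minfold_min : ∀ (l : List (String × Int)) (m0 m : String × Int),
    l.foldl minStep (some m0) = some m → ∀ y ∈ l, keyItem m ≤ keyItem y := by
  intro l
  induction l with
  | nil => intro m0 m _ y hy; simp at hy
  | cons x xs ih =>
    intro m0 m hm y hy
    rw [List.foldl_cons] at hm
    cases hb : itemLt x m0 with
    | true =>
      have hstep : minStep (some m0) x = some x := by simp [minStep, hb]
      rw [hstep] at hm
      rcases List.mem_cons.1 hy with rfl | hy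
      · obtain ⟨m', hm', hle, _⟩ := minfold_le xs y
        rw [hm'] at hm
        cases hm
        exact hle
      · exact ih x m hm y hy
    | false =>
      have hstep : minStep (some m0) x = some m0 := by simp [minStep, hb]
      rw [hstep] at hm
      rcases List.mem_cons.1 hy with rfl | hy
      · obtain ⟨m', hm', hle, _⟩ := minfold_le xs m0
        rw [hm'] at hm
        cases hm
        have hxm0 : keyItem m0 ≤ keyItem y := by
          have := (itemLt_iff y m0).not.1 (by simp [hb])
          exact le_of_not_gt this
        exact le_trans hle hxm0
      · exact ih m0 m hm y hy

-- port B's insertion fold is PySem's sorted with the Lex-valued key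
theorem foldB_eq_sorted (values : List String) :
    values.foldl (fun acc v => PySem.List.insertBy tieLt v acc) [] =
      PySem.List.sorted values keyTie := by
  have hf : tieLt = fun a b => decide (keyTie a < keyTie b) := by
    funext a b
    exact tieLt_eq a b
  rw [PySem.List.sorted_eq_foldl_insertBy, hf]

-- the characterising key: a value's full minimisation key relative to a multiset given as a list
def keyP (p : List String) (v : String) : Lex (Int × Lex (String × Lex (Int × String))) :=
  toLex (-((p.count v : Int)), keyTie v)

theorem keyTie_inj {a b : String} (h : keyTie a = keyTie b) : a = b := by
  unfold keyTie at h
  rw [toLex_inj] at h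
  have h2 := congrArg Prod.snd h
  rw [toLex_inj] at h2
  exact congrArg Prod.snd h2

-- B's fold over the sorted tail computes the keyP-minimal element
-- lexicographic ≤ on the full key, unfolded to its components
theorem lexle {c d : Int} {x y : Lex (String × Lex (Int × String))} :
    toLex (c, x) ≤ toLex (d, y) ↔ (c < d ∨ (c = d ∧ x ≤ y)) := by
  rw [Prod.Lex.le_iff]; simp

theorem keyP_le_count {p : List String} {a b : String} (h : keyP p a ≤ keyP p b) :
    p.count b ≤ p.count a := by
  unfold keyP at h
  rw [lexle] at h
  rcases h with h | ⟨h, _⟩ <;> omega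

theorem keyP_eq_of_count {p q : List String} {x : String}
    (h : q.count x = p.count x) : keyP q x = keyP p x := by
  unfold keyP
  rw [h]

-- B's fold over the sorted tail computes the keyP-minimal element
theorem run_min :
  ∀ (t p : List String) (best prev : String) (bestC runC : Int),
    (p ++ t).Pairwise (fun a b => keyTie a ≤ keyTie b) →
    prev ∈ p →
    (∀ x ∈ p, keyTie x ≤ keyTie prev) →
    runC = (p.count prev : Int) →
    best ∈ p →
    bestC = (p.count best : Int) →
    (∀ x ∈ p, keyP p best ≤ keyP p x) →
    (t.foldl runStep (best, prev, bestC, runC)).1 ∈ p ++ t ∧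
      ∀ x ∈ p ++ t, keyP (p ++ t) (t.foldl runStep (best, prev, bestC, runC)).1 ≤ keyP (p ++ t) x := by
  intro t
  induction t with
  | nil =>
    intro p best prev bestC runC hch hprev hprevMax hrunC hbest hbestC hmin
    simpa using ⟨hbest, hmin⟩
  | cons v t' ih =>
    intro p best prev bestC runC hch hprev hprevMax hrunC hbest hbestC hmin
    have hch' : ((p ++ [v]) ++ t').Pairwise (fun a b => keyTie a ≤ keyTie b) := by
      simpa [List.append_assoc] using hch
    have hcross : ∀ x ∈ p, ∀ y ∈ v :: t', keyTie x ≤ keyTie y := (List.pairwise_append.mp hch).2.2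
    have hpv : keyTie prev ≤ keyTie v := hcross prev hprev v (by simp)
    have hallv : ∀ x ∈ p ++ [v], keyTie x ≤ keyTie v := by
      intro x hx
      rcases List.mem_append.1 hx with hx | hx
      · exact le_trans (hprevMax x hx) hpv
      · simp at hx; subst hx; exact le_rfl
    have hcnt_ne : ∀ x : String, x ≠ v → (p ++ [v]).count x = p.count x := by
      intro x hx
      simp [List.count_append, Ne.symm hx]
    have hcnt_v : (p ++ [v]).count v = p.count v + 1 := by
      simp [List.count_append]
    have hgoal : p ++ v :: t' = (p ++ [v]) ++ t' := by simp
    rw [hgoal, List.foldl_cons]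
    by_cases hvp : v = prev
    · -- v continues the current run
      have hcntpv : p.count v = p.count prev := by rw [hvp]
      by_cases hgt : runC + 1 > bestC
      · -- the longer run becomes the new best
        have hstep : runStep (best, prev, bestC, runC) v = (v, v, runC + 1, runC + 1) := by
          simp [runStep, hvp, hgt]
        rw [hstep]
        apply ih (p ++ [v]) v v (runC + 1) (runC + 1) hch' (by simp) hallv
        · push_cast [hcnt_v]; omega
        · simp
        · push_cast [hcnt_v]; omega
        · intro x hx
          by_cases hxv : x = v
          · subst hxv; exact le_rfl
          · have hxp : x ∈ p := by
              rcases List.mem_append.1 hx with hxp | hxp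
              · exact hxp
              · simp at hxp; exact absurd hxp hxv
            have hcx : (p ++ [v]).count x = p.count x := hcnt_ne x hxv
            have hle := keyP_le_count (hmin x hxp)
            unfold keyP
            rw [lexle]
            left
            push_cast [hcnt_v, hcx]
            omega
      · -- run not yet longer than the best
        have hbestne : best ≠ v := by
          intro hbv
          rw [hbv, hcntpv] at hbestC
          omega
        have hstep : runStep (best, prev, bestC, runC) v = (best, v, bestC, runC + 1) := by
          simp [runStep, hvp, hgt]
        rw [hstep]
        apply ih (p ++ [v]) best v bestC (runC + 1) hch' (by simp) hallv
        · push_cast [hcnt_v]; omega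
        · exact List.mem_append.2 (Or.inl hbest)
        · rw [hcnt_ne best hbestne]; exact hbestC
        · intro x hx
          by_cases hxv : x = v
          · subst hxv
            unfold keyP
            rw [lexle]
            push_cast [hcnt_v, hcnt_ne best hbestne, hcntpv]
            rcases lt_or_eq_of_le (by omega : runC + 1 ≤ bestC) with hlt | heq
            · left; omega
            · right
              constructor
              · omega
              · exact le_trans (hprevMax best hbest) hpv
          · have hxp : x ∈ p := by
              rcases List.mem_append.1 hx with hxp | hxp
              · exact hxp
              · simp at hxp; exact absurd hxp hxv
            rw [keyP_eq_of_count (hcnt_ne x hxv), keyP_eq_of_count (hcnt_ne best hbestne)]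
            exact hmin x hxp
    · -- v starts a fresh run
      have hvnp : v ∉ p := by
        intro hv
        exact hvp (keyTie_inj (le_antisymm (hprevMax v hv) hpv))
      have hcntpv : p.count v = 0 := List.count_eq_zero.2 hvnp
      have hbpos : 0 < p.count best := List.count_pos_iff.2 hbest
      have hbestne : best ≠ v := fun hbv => hvnp (hbv ▸ hbest)
      have hng : ¬ ((1 : Int) > bestC) := by omega
      have hstep : runStep (best, prev, bestC, runC) v = (best, v, bestC, 1) := by
        simp [runStep, hvp, hng]
      rw [hstep]
      apply ih (p ++ [v]) best v bestC 1 hch' (by simp) hallv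
      · push_cast [hcnt_v, hcntpv]
      · exact List.mem_append.2 (Or.inl hbest)
      · rw [hcnt_ne best hbestne]; exact hbestC
      · intro x hx
        by_cases hxv : x = v
        · subst hxv
          unfold keyP
          rw [lexle]
          push_cast [hcnt_v, hcnt_ne best hbestne, hcntpv]
          rcases lt_or_eq_of_le (by omega : (1 : Int) ≤ (p.count best : Int)) with hlt | heq
          · left; omega
          · right
            constructor
            · omega
            · exact le_trans (hprevMax best hbest) hpv
        · have hxp : x ∈ p := by
            rcases List.mem_append.1 hx with hxp | hxp
            · exact hxp
            · simp at hxp; exact absurd hxp hxv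
          rw [keyP_eq_of_count (hcnt_ne x hxv), keyP_eq_of_count (hcnt_ne best hbestne)]
          exact hmin x hxp

theorem alt_char (values : List String) (h : values ≠ []) :
    pick_mode_py_alt values ∈ values ∧
      ∀ x ∈ values, keyP values (pick_mode_py_alt values) ≤ keyP values x := by
  cases hs : PySem.List.sorted values keyTie with
  | nil => exact absurd ((PySem.List.sorted_eq_nil_iff values keyTie false).1 hs) h
  | cons h0 t =>
    have hperm : (h0 :: t).Perm values := hs ▸ PySem.List.sorted_perm values keyTie false
    have hch : (h0 :: t).Pairwise (fun a b => keyTie a ≤ keyTie b) :=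
      hs ▸ PySem.List.sorted_pairwise values keyTie
    have hmain := run_min t [h0] h0 h0 1 1 (by simpa using hch) (by simp) (by simp)
      (by simp) (by simp) (by simp) (by intro x hx; simp at hx; subst hx; exact le_rfl)
    obtain ⟨hmem, hmin⟩ := hmain
    have hres : pick_mode_py_alt values = (t.foldl runStep (h0, h0, 1, 1)).1 := by
      unfold pick_mode_py_alt
      rw [foldB_eq_sorted, hs]
    have hkk : ∀ y, keyP (h0 :: t) y = keyP values y := fun y => keyP_eq_of_count (hperm.count_eq y)
    constructor
    · rw [hres]
      exact hperm.mem_iff.1 (by simpa using hmem)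
    · intro x hx
      have hx' : x ∈ [h0] ++ t := by simpa using hperm.mem_iff.2 hx
      have hle := hmin x hx'
      rw [hres]
      simpa [hkk] using hle

theorem a_char (values : List String) (h : values ≠ []) :
    pick_mode_py values ∈ values ∧
      ∀ x ∈ values, keyP values (pick_mode_py values) ≤ keyP values x := by
  have hnodup : (values.foldl (fun (c : PySem.Dict String Int) v => c.insert v (c.getD v 0 + 1)) PySem.Dict.empty).keys.Nodup :=
    PySem.Dict.nodup_keys_foldl_insert values (fun c v => c.getD v 0 + 1) PySem.Dict.empty PySem.Dict.nodup_keys_empty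
  have hgetD : ∀ v, (values.foldl (fun (c : PySem.Dict String Int) v => c.insert v (c.getD v 0 + 1)) PySem.Dict.empty).getD v 0 = (values.count v : Int) := by
    intro v
    rw [PySem.Dict.getD_foldl_insert_add_one, PySem.Dict.getD_empty]
    ring
  have hkeys : ∀ v, v ∈ (values.foldl (fun (c : PySem.Dict String Int) v => c.insert v (c.getD v 0 + 1)) PySem.Dict.empty).keys ↔ v ∈ values := by
    intro v
    rw [PySem.Dict.keys_foldl_insert]
    rw [PySem.Set.mem_update]
    simp [PySem.Dict.keys_empty]
  set counts := values.foldl (fun (c : PySem.Dict String Int) v => c.insert v (c.getD v 0 + 1)) PySem.Dict.empty with hc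
  -- items is nonempty
  obtain ⟨v0, hv0⟩ := List.exists_mem_of_ne_nil values h
  have hv0k : v0 ∈ counts.keys := (hkeys v0).2 hv0
  have hitems_ne : counts.items ≠ [] := by
    intro hnil
    rw [PySem.Dict.keys, hnil] at hv0k
    simp at hv0k
  -- the min() fold returns some m
  obtain ⟨i0, rest, hil⟩ : ∃ i0 rest, counts.items = i0 :: rest := by
    cases hi : counts.items with
    | nil => exact absurd hi hitems_ne
    | cons a b => exact ⟨a, b, rfl⟩
  obtain ⟨m, hm, hle0, hmem0⟩ := minfold_le rest i0
  have hfold : counts.items.foldl minStep none = some m := by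
    rw [hil, List.foldl_cons]
    exact hm
  have hres : pick_mode_py values = m.1 := by
    unfold pick_mode_py
    rw [← hc]
    show (match counts.items.foldl minStep none with
      | some it => it.1 | none => "") = m.1
    rw [hfold]
  have hmmem : m ∈ counts.items := by
    rw [hil]
    rcases hmem0 with rfl | hmem0
    · simp
    · simp [hmem0]
  have hmin_items : ∀ y ∈ counts.items, keyItem m ≤ keyItem y := by
    intro y hy
    rw [hil] at hy
    rcases List.mem_cons.1 hy with rfl | hy
    · exact hle0
    · exact minfold_min rest i0 m hm y hy
  have hm2 : m.2 = (values.count m.1 : Int) := by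
    have := PySem.Dict.getD_of_mem_items counts (k := m.1) (v := m.2) (by simpa using hmmem) hnodup 0
    rw [hgetD] at this
    omega
  have hm1mem : m.1 ∈ values := (hkeys m.1).1 (PySem.Dict.mem_keys_of_mem_items counts hmmem)
  refine ⟨by rw [hres]; exact hm1mem, ?_⟩
  intro x hx
  -- x is a key, so (x, count x) ∈ items
  have hxk : x ∈ counts.keys := (hkeys x).2 hx
  rw [PySem.Dict.keys] at hxk
  obtain ⟨p, hpmem, hpfst⟩ := List.mem_map.1 hxk
  have hp2 : p.2 = (values.count x : Int) := by
    have := PySem.Dict.getD_of_mem_items counts (k := p.1) (v := p.2) (by simpa using hpmem) hnodup 0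
    rw [hgetD, hpfst] at this
    omega
  have hle := hmin_items p hpmem
  rw [hres]
  unfold keyItem at hle
  unfold keyP
  rw [hm2, hp2, hpfst] at hle
  exact hle

-- ===== VERDICT (by name: the statement is the Claim_ definition above) =====
theorem pick_mode_py_spec : Claim_equal_pick_mode_py := by
  intro values _ hpre
  unfold Spec_pick_mode_py
  obtain ⟨haM, haMin⟩ := a_char values hpre
  obtain ⟨hbM, hbMin⟩ := alt_char values hpre
  have h1 := haMin _ hbM
  have h2 := hbMin _ haM
  have hk : keyP values (pick_mode_py values) = keyP values (pick_mode_py_alt values) :=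
    le_antisymm h1 h2
  unfold keyP at hk
  rw [toLex_inj] at hk
  exact keyTie_inj (congrArg Prod.snd hk)
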